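-- pv_equiv track=rewrite | github.com/costa-group/grey | src/liveness/utils.py | combine_lists_with_order
-- ===== SOURCE A (Python) =====
-- from typing import Dict, List, Optional, Tuple
--
-- def combine_lists_with_order(original_list: List[Optional[str]], second_list: List) -> List:
--     """
--     Merges the two lists so that None elements in the original list are replaced by
--     the second list, starting with the bottom of both lists.
--     """
--     # Try to place the variables in reversed order
--     i, j = len(original_list) - 1, len(second_list) - 1
--
--     while i >= 0 and j >= 0:
--         if original_list[i] is None:
--             original_list[i] = second_list[j]
--             j -= 1
--         i -= 1
--
--     # All variables have been placed in between. Hence, I have to insert the remaining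
--     # elements at the beginning
--     return second_list[:j+1] + original_list
-- ===== SOURCE B (Python) =====
-- # B: count-then-forward-fill decomposition (vs A's backward two-pointer scan).
-- # Mutates original_list in place at the same positions/values as A.
-- def combine_lists_with_order(original_list, second_list):
--     num_none = original_list.count(None)
--     m = len(second_list)
--     t = min(num_none, m)
--     skip = num_none - t
--     leftover = second_list[:m - t]
--     values = iter(second_list[m - t:])
--     seen = 0
--     for i, x in enumerate(original_list):
--         if x is None:
--             seen += 1
--             if seen > skip:
--                 original_list[i] = next(values)
--     return leftover + original_list
-- ===== Notes on version B (the rewrite author's own statement) =====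
-- stated objective: alternative
-- what changed: Replaces A's single backward two-pointer scan with a count-then-forward-fill decomposition: count the Nones, split second_list into leftover and fill values, then walk forward skipping the excess leading Nones and filling the rest in order.
import Mathlib
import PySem

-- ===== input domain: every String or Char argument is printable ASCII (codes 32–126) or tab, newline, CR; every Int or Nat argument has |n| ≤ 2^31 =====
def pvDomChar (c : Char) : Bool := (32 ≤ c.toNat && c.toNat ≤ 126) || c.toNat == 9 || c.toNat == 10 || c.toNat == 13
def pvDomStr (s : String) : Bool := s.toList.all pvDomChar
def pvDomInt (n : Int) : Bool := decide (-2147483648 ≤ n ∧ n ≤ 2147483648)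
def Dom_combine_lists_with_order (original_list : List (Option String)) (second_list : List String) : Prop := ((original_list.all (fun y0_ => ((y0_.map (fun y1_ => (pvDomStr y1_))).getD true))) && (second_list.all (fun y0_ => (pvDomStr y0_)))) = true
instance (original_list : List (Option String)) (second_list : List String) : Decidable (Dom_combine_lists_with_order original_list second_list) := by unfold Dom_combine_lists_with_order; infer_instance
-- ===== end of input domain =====

-- B replaces A's backward two-pointer fill with a count-then-forward-fill decomposition;
-- the equivalence proved is about the RETURN value (the Python A mutates original_list in
-- place; the Python B performs the identical mutation).

-- ===== PORT A =====
-- A scans original_list and second_list backwards while both indices are ≥ 0, filling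
-- None slots from the back of second_list.  The backward scan is transliterated as a
-- structural recursion over the REVERSED lists: first component = mutated original_list
-- (reversed), second component = the still-unconsumed part of second_list (reversed),
-- i.e. second_list[:j+1] reversed.  The 's = []' equation is the loop exit 'j < 0'.
def fillA : List (Option String) → List String → List (Option String) × List String
  | os, [] => (os, [])
  | [], v :: vs => ([], v :: vs)
  | some x :: os, v :: vs =>
      let p := fillA os (v :: vs)
      (some x :: p.1, p.2)
  | none :: os, v :: vs =>
      let p := fillA os vs
      (some v :: p.1, p.2)

def combine_lists_with_order (original_list : List (Option String)) (second_list : List String) : List (Option String) :=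
  let p := fillA original_list.reverse second_list.reverse
  p.2.reverse.map some ++ p.1.reverse

-- ===== PORT B =====
-- forward walk: on a None, while the skip counter is positive leave it and decrement;
-- afterwards fill with the next of the values list.
def fillB : List (Option String) → Nat → List String → List (Option String)
  | [], _, _ => []
  | some x :: os, skip, vs => some x :: fillB os skip vs
  | none :: os, skip + 1, vs => none :: fillB os skip vs
  | none :: os, 0, v :: vs => some v :: fillB os 0 vs
  | none :: os, 0, [] => none :: fillB os 0 []

def combine_lists_with_order_alt (original_list : List (Option String)) (second_list : List String) : List (Option String) :=
  let num_none := original_list.count none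
  let m := second_list.length
  let t := min num_none m
  let leftover := second_list.take (m - t)
  let values := second_list.drop (m - t)
  leftover.map some ++ fillB original_list (num_none - t) values

-- ===== PRECONDITION & SPEC =====
def Spec_combine_lists_with_order (original_list : List (Option String)) (second_list : List String) (out : List (Option String)) : Prop := out = combine_lists_with_order_alt original_list second_list
instance (original_list : List (Option String)) (second_list : List String) (out : List (Option String)) : Decidable (Spec_combine_lists_with_order original_list second_list out) := by unfold Spec_combine_lists_with_order; infer_instance

-- ===== CLAIM (what is proved, stated in full; the proofs are below) =====
def Claim_equal_combine_lists_with_order : Prop := ∀ (original_list : List (Option String)) (second_list : List String), Dom_combine_lists_with_order original_list second_list → Spec_combine_lists_with_order original_list second_list (combine_lists_with_order original_list second_list)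

-- ===== LEMMAS AND PROOFS =====

-- effect of one more (last-processed) element on A's backward fill
def stepA (o : Option String) (p : List (Option String) × List String) : List (Option String) × List String :=
  match o, p.2 with
  | some x, s => (p.1 ++ [some x], s)
  | none, [] => (p.1 ++ [none], [])
  | none, v :: vs => (p.1 ++ [some v], vs)

lemma fillA_nil_right (R : List (Option String)) : fillA R [] = (R, []) := by
  cases R <;> rfl

lemma fillA_snoc (R : List (Option String)) (S : List String) (o : Option String) :
    fillA (R ++ [o]) S = stepA o (fillA R S) := by
  induction R generalizing S with
  | nil =>
      cases S with
      | nil => cases o <;> simp [fillA, stepA]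
      | cons v vs => cases o <;> cases vs <;> simp [fillA, stepA]
  | cons r R ih =>
      cases S with
      | nil =>
          cases o <;> simp [fillA_nil_right, stepA]
      | cons v vs =>
          cases r with
          | none =>
              rcases o with _ | y <;>
                rcases h2 : (fillA R vs).2 with _ | ⟨w, ws⟩ <;>
                  simp [fillA, ih, stepA, h2]
          | some x =>
              rcases o with _ | y <;>
                rcases h2 : (fillA R (v :: vs)).2 with _ | ⟨w, ws⟩ <;>
                  simp [fillA, ih, stepA, h2]

-- the main invariant: A's backward fill on the reversed lists equals B's forward fill
set_option maxRecDepth 4000 in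
lemma fill_main (orig : List (Option String)) (S : List String) :
    fillA orig.reverse S =
      ((fillB orig (orig.count none - min (orig.count none) S.length)
          ((S.take (min (orig.count none) S.length)).reverse)).reverse,
        S.drop (min (orig.count none) S.length)) := by
  induction orig generalizing S with
  | nil => cases S <;> simp [fillA, fillB]
  | cons o os ih =>
      have h : (o :: os).reverse = os.reverse ++ [o] := by simp
      rw [h, fillA_snoc, ih]
      cases o with
      | some x => simp [stepA, fillB]
      | none =>
          have hc : (none :: os).count none = os.count none + 1 := by simp
          by_cases hlt : os.count none < S.length
          · have ht : min (os.count none) S.length = os.count none := by omega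
            have ht' : min (os.count none + 1) S.length = os.count none + 1 := by omega
            have hd : S.drop (os.count none) =
                S[os.count none] :: S.drop (os.count none + 1) :=
              List.drop_eq_getElem_cons hlt
            have htake : S.take (os.count none + 1) =
                S.take (os.count none) ++ [S[os.count none]] :=
              List.take_succ_eq_append_getElem hlt
            have hV : (List.take (os.count none + 1) S).reverse =
                S[os.count none] :: (List.take (os.count none) S).reverse := by
              rw [htake]; simp
            rw [hc, ht, ht', hd, hV]
            simp [stepA, fillB]
          · have hge : S.length ≤ os.count none := by omega
            have ht : min (os.count none) S.length = S.length := by omega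
            have ht' : min (os.count none + 1) S.length = S.length := by omega
            have hdrop : S.drop S.length = ([] : List String) := by simp
            rw [hc, ht, ht', hdrop]
            have hskip : os.count none + 1 - S.length = (os.count none - S.length) + 1 := by
              omega
            rw [hskip]
            simp [stepA, fillB]

-- ===== VERDICT (by name: the statement is the Claim_ definition above) =====
theorem combine_lists_with_order_spec : Claim_equal_combine_lists_with_order := by
  intro orig second _
  show _ = _
  unfold combine_lists_with_order combine_lists_with_order_alt
  rw [fill_main]
  have hm : (second.reverse).length = second.length := by simp
  simp only [hm]
  have h1 : (second.reverse.drop (min (orig.count none) second.length)).reverse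
      = second.take (second.length - min (orig.count none) second.length) := by
    rw [List.reverse_drop]; simp
  have h2 : (second.reverse.take (min (orig.count none) second.length)).reverse
      = second.drop (second.length - min (orig.count none) second.length) := by
    rw [List.reverse_take]; simp
  simp [h1, h2]
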